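-- pv_equiv track=rewrite | github.com/hyunsung1123/BaekJoon | 프로그래머스/lv1/131128. 숫자 짝꿍/숫자 짝꿍.py | solution
-- ===== SOURCE A (Python) =====
-- from collections import deque
--
-- def solution(X, Y):
--     answer = ''
--     x_list = list(X)
--     y_list = list(Y)
--     x_list.sort(reverse=True)
--     y_list.sort(reverse=True)
--     x_list=deque(x_list)
--     y_list=deque(y_list)
--     while(True):
--         if x_list:
--             x=x_list.popleft()
--         else:
--             break
--         if y_list:
--             y=y_list.popleft()
--         else:
--             break
--         if x==y:
--             answer+=x
--         elif x>y:
--             y_list.appendleft(y)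
--         else:
--             x_list.appendleft(x)
--     if answer=="":
--         answer="-1"
--     elif all("0"==i for i in answer):
--         answer="0"
--     return answer
-- ===== SOURCE B (Python) =====
-- from collections import Counter
--
-- def solution(X, Y):
--     cx, cy = Counter(X), Counter(Y)
--     answer = ''.join(c * min(cx[c], cy[c]) for c in sorted(set(X) & set(Y), reverse=True))
--     if answer == '':
--         return '-1'
--     if all(c == '0' for c in answer):
--         return '0'
--     return answer
-- ===== Notes on version B (the rewrite author's own statement) =====
-- stated objective: alternative
-- what changed: Replaces A's sort-both-strings-then-merge-with-two-deques loop by per-character counting: a Counter of each string, min count per common character, emitted in descending character order.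
import Mathlib
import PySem

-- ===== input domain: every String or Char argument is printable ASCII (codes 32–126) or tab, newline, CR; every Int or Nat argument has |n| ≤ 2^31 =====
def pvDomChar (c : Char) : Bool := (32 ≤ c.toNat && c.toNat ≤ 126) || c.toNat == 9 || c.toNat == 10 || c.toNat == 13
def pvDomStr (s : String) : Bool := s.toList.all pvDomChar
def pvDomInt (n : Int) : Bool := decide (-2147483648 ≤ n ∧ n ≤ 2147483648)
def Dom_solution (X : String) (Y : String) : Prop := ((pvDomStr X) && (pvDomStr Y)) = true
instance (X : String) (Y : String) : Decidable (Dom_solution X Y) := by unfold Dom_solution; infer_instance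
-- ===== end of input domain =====

-- B replaces A's sort-both-strings-then-merge-with-two-deques loop by per-character counting
-- (Counter of each string, min per common character, emitted in descending character order).

-- ===== PORT A =====
-- A's while(True) loop: both deques sorted descending; answer accumulated as a char list.
def mergeLoop : List Char → List Char → List Char → List Char
  | [], _, ans => ans
  | _ :: _, [], ans => ans
  | x :: xs, y :: ys, ans =>
    if x == y then mergeLoop xs ys (ans ++ [x])
    else if y < x then mergeLoop xs (y :: ys) ans
    else mergeLoop (x :: xs) ys ans
termination_by xs ys _ => xs.length + ys.length
decreasing_by all_goals simp <;> omega

def solution (X : String) (Y : String) : String :=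
  let xl := PySem.List.sorted X.toList (fun c => c) true
  let yl := PySem.List.sorted Y.toList (fun c => c) true
  let ans := mergeLoop xl yl []
  if ans = [] then "-1"
  else if ans.all (fun i => '0' == i) then "0"
  else String.ofList ans

-- ===== PORT B =====
def solution_alt (X : String) (Y : String) : String :=
  let cx := PySem.Dict.counter X.toList
  let cy := PySem.Dict.counter Y.toList
  let common := PySem.Set.inter (PySem.Set.ofList X.toList) (PySem.Set.ofList Y.toList)
  let ans := (PySem.List.sorted common (fun c => c) true).flatMap
      (fun c => List.replicate (min (cx.getD c 0) (cy.getD c 0)).toNat c)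
  if ans = [] then "-1"
  else if ans.all (fun c => c == '0') then "0"
  else String.ofList ans

-- ===== PRECONDITION & SPEC =====
def Spec_solution (X : String) (Y : String) (out : String) : Prop := out = solution_alt X Y
instance (X : String) (Y : String) (out : String) : Decidable (Spec_solution X Y out) := by unfold Spec_solution; infer_instance

-- ===== CLAIM (what is proved, stated in full; the proofs are below) =====
def Claim_equal_solution : Prop := ∀ (X : String) (Y : String), Dom_solution X Y → Spec_solution X Y (solution X Y)

-- ===== LEMMAS AND PROOFS =====

lemma mergeLoop_append (xs ys ans : List Char) :
    mergeLoop xs ys ans = ans ++ mergeLoop xs ys [] := by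
  induction hn : xs.length + ys.length using Nat.strong_induction_on generalizing xs ys ans with
  | _ n IH =>
  match xs, ys with
  | [], ys => simp [mergeLoop]
  | x::xs, [] => simp [mergeLoop]
  | x::xs, y::ys =>
    rw [mergeLoop]; conv_rhs => rw [mergeLoop]
    split_ifs with h1 h2
    · rw [IH (xs.length + ys.length) (by simp at hn; omega) xs ys (ans ++ [x]) rfl,
         IH (xs.length + ys.length) (by simp at hn; omega) xs ys ([] ++ [x]) rfl]
      simp
    · exact IH (xs.length + (y::ys).length) (by simp at hn ⊢; omega) xs (y::ys) ans rfl
    · exact IH ((x::xs).length + ys.length) (by simp at hn ⊢; omega) (x::xs) ys ans rfl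

lemma count_mergeLoop (xs ys : List Char)
    (hx : xs.Pairwise (fun a b => b ≤ a)) (hy : ys.Pairwise (fun a b => b ≤ a)) (c : Char) :
    (mergeLoop xs ys []).count c = min (xs.count c) (ys.count c) := by
  induction hn : xs.length + ys.length using Nat.strong_induction_on generalizing xs ys with
  | _ n IH =>
  match xs, ys, hx, hy with
  | [], ys, _, _ => simp [mergeLoop]
  | x::xs, [], _, _ => simp [mergeLoop]
  | x::xs, y::ys, hx, hy =>
    rw [mergeLoop]; split_ifs with h1 h2
    · have hxy : x = y := by simpa using h1
      rw [mergeLoop_append]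
      have IH' := IH (xs.length + ys.length) (by simp at hn; omega) xs ys hx.of_cons hy.of_cons rfl
      subst hxy
      rcases eq_or_ne c x with hc | hc
      · subst hc; simp [IH']
      · simp [IH', Ne.symm hc]
    · have hle : ∀ z ∈ ys, z ≤ y := (List.pairwise_cons.mp hy).1
      have hnot : x ∉ y :: ys := by
        intro hm; rcases List.mem_cons.mp hm with h | h
        · exact absurd h.symm (by intro e; exact absurd (e ▸ h2) (lt_irrefl _))
        · exact absurd (hle x h) (not_le.mpr h2)
      have IH' := IH (xs.length + (y::ys).length) (by simp at hn ⊢; omega) xs (y::ys) hx.of_cons hy rfl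
      rw [IH']
      rcases eq_or_ne c x with hc | hc
      · subst hc
        have h0 : (y::ys).count c = 0 := List.count_eq_zero.mpr hnot
        simp [h0]
      · simp [List.count_cons, Ne.symm hc]
    · have h3 : x < y := by
        rcases lt_trichotomy x y with h | h | h
        · exact h
        · exact absurd (by simp [h]) h1
        · exact absurd h h2
      have hle : ∀ z ∈ xs, z ≤ x := (List.pairwise_cons.mp hx).1
      have hnot : c ∈ (x::xs) → c = y → False := by
        intro hm he; subst he
        rcases List.mem_cons.mp hm with h | h
        · exact absurd h.symm (ne_of_lt h3)
        · exact absurd (hle _ h) (not_le.mpr h3)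
      have IH' := IH ((x::xs).length + ys.length) (by simp at hn ⊢; omega) (x::xs) ys hx hy.of_cons rfl
      rw [IH']
      rcases eq_or_ne c y with hc | hc
      · subst hc
        have h0 : (x::xs).count c = 0 := List.count_eq_zero.mpr (fun hm => hnot hm rfl)
        simp [h0]
      · simp [List.count_cons, Ne.symm hc]

lemma pairwise_mergeLoop (xs ys : List Char)
    (hx : xs.Pairwise (fun a b => b ≤ a)) (hy : ys.Pairwise (fun a b => b ≤ a)) :
    (mergeLoop xs ys []).Pairwise (fun a b => b ≤ a) := by
  induction hn : xs.length + ys.length using Nat.strong_induction_on generalizing xs ys with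
  | _ n IH =>
  match xs, ys, hx, hy with
  | [], ys, _, _ => simp [mergeLoop]
  | x::xs, [], _, _ => simp [mergeLoop]
  | x::xs, y::ys, hx, hy =>
    rw [mergeLoop]; split_ifs with h1 h2
    · rw [mergeLoop_append]
      simp only [List.nil_append, List.singleton_append]
      have hrec := IH (xs.length + ys.length) (by simp at hn; omega) xs ys hx.of_cons hy.of_cons rfl
      refine List.pairwise_cons.mpr ⟨?_, hrec⟩
      intro z hz
      have hcnt := count_mergeLoop xs ys hx.of_cons hy.of_cons z
      have hzx : z ∈ xs := by
        have := List.count_pos_iff.mpr hz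
        rw [hcnt] at this
        exact List.count_pos_iff.mp (by omega)
      exact (List.pairwise_cons.mp hx).1 z hzx
    · exact IH (xs.length + (y::ys).length) (by simp at hn ⊢; omega) xs (y::ys) hx.of_cons hy rfl
    · exact IH ((x::xs).length + ys.length) (by simp at hn ⊢; omega) (x::xs) ys hx hy.of_cons rfl

lemma count_flatMap_replicate (ks : List Char) (n : Char → Nat) (hnd : ks.Nodup) (c : Char) :
    (ks.flatMap (fun k => List.replicate (n k) k)).count c = if c ∈ ks then n c else 0 := by
  induction ks with
  | nil => simp
  | cons k ks ih =>
    have hk : k ∉ ks := (List.nodup_cons.mp hnd).1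
    rw [List.flatMap_cons, List.count_append, List.count_replicate, ih (List.nodup_cons.mp hnd).2]
    rcases eq_or_ne c k with hc | hc
    · subst hc; simp [hk]
    · simp [hc, Ne.symm hc]

lemma pairwise_flatMap_replicate (ks : List Char) (n : Char → Nat)
    (hks : ks.Pairwise (fun a b => b < a)) :
    (ks.flatMap (fun k => List.replicate (n k) k)).Pairwise (fun a b => b ≤ a) := by
  induction ks with
  | nil => simp
  | cons k ks ih =>
    rw [List.flatMap_cons]
    refine List.pairwise_append.mpr ⟨?_, ih hks.of_cons, ?_⟩
    · simp [List.pairwise_replicate]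
    · intro a ha b hb
      have ha' : a = k := List.eq_of_mem_replicate ha
      rcases List.mem_flatMap.mp hb with ⟨k', hk', hbk⟩
      have hb' : b = k' := List.eq_of_mem_replicate hbk
      rw [ha', hb']
      exact le_of_lt ((List.pairwise_cons.mp hks).1 k' hk')

lemma eq_of_counts (l₁ l₂ : List Char)
    (h₁ : l₁.Pairwise (fun a b => b ≤ a)) (h₂ : l₂.Pairwise (fun a b => b ≤ a))
    (hc : ∀ c, l₁.count c = l₂.count c) : l₁ = l₂ :=
  List.Perm.eq_of_pairwise (fun _ _ _ _ hab hba => le_antisymm hba hab) h₁ h₂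
    (List.perm_iff_count.mpr hc)

lemma core_eq (X Y : String) :
    mergeLoop (PySem.List.sorted X.toList (fun c => c) true)
              (PySem.List.sorted Y.toList (fun c => c) true) [] =
    (PySem.List.sorted (PySem.Set.inter (PySem.Set.ofList X.toList) (PySem.Set.ofList Y.toList))
        (fun c => c) true).flatMap
      (fun c => List.replicate (min ((PySem.Dict.counter X.toList).getD c 0)
                                    ((PySem.Dict.counter Y.toList).getD c 0)).toNat c) := by
  set xl := PySem.List.sorted X.toList (fun c => c) true with hxl
  set yl := PySem.List.sorted Y.toList (fun c => c) true with hyl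
  set common := PySem.Set.inter (PySem.Set.ofList X.toList) (PySem.Set.ofList Y.toList) with hcom
  set ks := PySem.List.sorted common (fun c => c) true with hks
  have hfun : (fun c => List.replicate (min ((PySem.Dict.counter X.toList).getD c 0)
                  ((PySem.Dict.counter Y.toList).getD c 0)).toNat c)
      = (fun c => List.replicate (min (X.toList.count c) (Y.toList.count c)) c) := by
    funext c
    rw [PySem.Dict.getD_counter, PySem.Dict.getD_counter]
    congr 1
    omega
  rw [hfun]
  have hpx : xl.Pairwise (fun a b => b ≤ a) := PySem.List.sorted_pairwise_rev X.toList (fun c => c)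
  have hpy : yl.Pairwise (fun a b => b ≤ a) := PySem.List.sorted_pairwise_rev Y.toList (fun c => c)
  have hndc : common.Nodup := PySem.Set.nodup_inter _ _ (PySem.Set.nodup_ofList _)
  have hndks : ks.Nodup := (PySem.List.sorted_perm common (fun c => c) true).nodup_iff.mpr hndc
  have hpks : ks.Pairwise (fun a b => b < a) := by
    have h1 := PySem.List.sorted_pairwise_rev common (fun c => c)
    have h2 : ks.Pairwise (· ≠ ·) := hndks
    exact (h1.and h2).imp (fun h => lt_of_le_of_ne h.1 (Ne.symm h.2))
  have hmem : ∀ c, c ∈ ks ↔ (c ∈ X.toList ∧ c ∈ Y.toList) := by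
    intro c
    rw [hks, PySem.List.mem_sorted, hcom, PySem.Set.mem_inter, PySem.Set.mem_ofList,
       PySem.Set.mem_ofList]
  refine eq_of_counts _ _ (pairwise_mergeLoop _ _ hpx hpy)
    (pairwise_flatMap_replicate _ _ hpks) ?_
  intro c
  rw [count_mergeLoop _ _ hpx hpy c, count_flatMap_replicate _ _ hndks c,
     (PySem.List.sorted_perm X.toList (fun c => c) true).count_eq,
     (PySem.List.sorted_perm Y.toList (fun c => c) true).count_eq]
  rcases Decidable.em (c ∈ ks) with hc | hc
  · simp [hc]
  · rw [if_neg hc]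
    have hor : c ∉ X.toList ∨ c ∉ Y.toList := by
      by_contra hcon
      push Not at hcon
      exact hc ((hmem c).mpr ⟨hcon.1, hcon.2⟩)
    rcases hor with h | h
    · simp [List.count_eq_zero.mpr h]
    · simp [List.count_eq_zero.mpr h]

-- ===== VERDICT (by name: the statement is the Claim_ definition above) =====
theorem solution_spec : Claim_equal_solution := by
  intro X Y _
  simp only [Spec_solution, solution, solution_alt]
  rw [core_eq X Y]
  have hpred : (fun i => ('0' == i)) = (fun c : Char => (c == '0')) := by
    funext c; rcases eq_or_ne c '0' with h | h
    · simp [h]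
    · simp [h, Ne.symm h]
  rw [hpred]
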